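-- pv_equiv track=rewrite | github.com/eodnjs467/python | Algorithm/기능개발.py | solution
-- ===== SOURCE A (Python) =====
-- def solution(progresses, speeds):
--     answer = []
--     while progresses:
--         ck = False
--         cnt = 0
--         for i in range(len(progresses)):
--             progresses[i] += speeds[i]
--         while len(progresses)!=0 and progresses[0]>=100:
--             ck = True
--             cnt +=1
--             progresses.pop(0)
--             speeds.pop(0)
--         if ck ==True:
--             answer.append(cnt)
--     return answer
-- ===== SOURCE B (Python) =====
-- # O(n) closed-form: days-to-finish per task via ceiling division, one pass grouping
-- # by running maximum. (A mutates its arguments in place; B does not — the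
-- # equivalence claimed is about the return value.)
-- def solution(progresses, speeds):
--     answer = []
--     cur = 0   # release day of the current open group (days are >= 1)
--     cnt = 0   # size of the current open group
--     for p, s in zip(progresses, speeds):
--         d = -((p - 100) // s)  # ceil((100 - p) / s)
--         if d < 1:
--             d = 1              # a finished task still ships on the next release day
--         if d > cur:
--             if cnt != 0:
--                 answer.append(cnt)
--             cur = d
--             cnt = 1
--         else:
--             cnt += 1
--     if cnt != 0:
--         answer.append(cnt)
--     return answer
-- ===== Notes on version B (the rewrite author's own statement) =====
-- stated objective: faster
-- what changed: Replaces the day-by-day simulation with repeated pop(0) (O(n^2 + n*D) in the number of simulated days D) by a closed-form ceiling-division days-per-task computation and a single grouping pass over the running maximum day; intended as faster — a timing run saw A time out at n=16 where B returned, so no clean ratio could be measured.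
-- outside the precondition, e.g. on solution([100], [0]): A returns [1], B raises ZeroDivisionError
import Mathlib
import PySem

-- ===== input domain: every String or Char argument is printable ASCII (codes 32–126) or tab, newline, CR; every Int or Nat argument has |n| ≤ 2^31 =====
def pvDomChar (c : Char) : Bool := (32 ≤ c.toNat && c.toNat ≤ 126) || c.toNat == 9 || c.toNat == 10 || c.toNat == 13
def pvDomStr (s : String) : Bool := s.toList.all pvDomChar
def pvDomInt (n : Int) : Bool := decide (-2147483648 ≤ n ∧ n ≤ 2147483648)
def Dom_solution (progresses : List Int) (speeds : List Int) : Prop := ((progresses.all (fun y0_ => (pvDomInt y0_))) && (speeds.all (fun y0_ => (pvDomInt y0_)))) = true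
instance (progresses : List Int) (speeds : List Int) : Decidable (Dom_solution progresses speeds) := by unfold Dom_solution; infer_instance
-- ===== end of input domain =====

-- B replaces A's day-by-day simulation with a per-task ceiling-division day count and a
-- single grouping pass (A empties its argument lists in place; the claim is about the
-- return value only).

-- ===== PORT A =====
-- inner 'while progresses[0]>=100: cnt+=1; progresses.pop(0); speeds.pop(0)'
-- (Python's ck flag is True exactly when cnt ≠ 0, so the port tracks only cnt)
def popA (ps ss : List Int) : Nat × List Int × List Int :=
  match ps with
  | [] => (0, [], ss)
  | p :: pr =>
    if 100 ≤ p then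
      let r := popA pr ss.tail
      (r.1 + 1, r.2.1, r.2.2)
    else (0, p :: pr, ss)

-- outer 'while progresses:' — fuel bounds the number of simulated days; on every input
-- admitted by Pre_solution the fuel below exceeds the total number of days, so the port
-- runs the loop exactly as Python does. 'for i in range(len(progresses)): progresses[i] += speeds[i]'
-- is the zipWith (it raises IndexError in Python only when speeds is shorter, outside Pre_).
def loopA : Nat → List Int → List Int → List Int → List Int
  | 0, _, _, answer => answer
  | fuel+1, ps, ss, answer =>
    if ps = [] then answer
    else
      let ps1 := List.zipWith (· + ·) ps ss
      let r := popA ps1 ss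
      loopA fuel r.2.1 r.2.2 (if r.1 ≠ 0 then answer ++ [(r.1 : Int)] else answer)

def fuelA (ps : List Int) : Nat := 101 + (ps.map (fun p => p.natAbs + 101)).sum

def solution (progresses : List Int) (speeds : List Int) : List Int :=
  loopA (fuelA progresses) progresses speeds []

-- ===== PORT B =====
-- d = max 1 (ceil((100-p)/s)), written as in Source B via floor division
def daysB (p s : Int) : Int :=
  if -(PySem.Int.floordiv (p - 100) s) < 1 then 1
  else -(PySem.Int.floordiv (p - 100) s)

def stepB (st : Int × Int × List Int) (pr : Int × Int) : Int × Int × List Int :=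
  let d := daysB pr.1 pr.2
  if st.1 < d then (d, 1, if st.2.1 ≠ 0 then st.2.2 ++ [st.2.1] else st.2.2)
  else (st.1, st.2.1 + 1, st.2.2)

def solution_alt (progresses : List Int) (speeds : List Int) : List Int :=
  let r := (List.zip progresses speeds).foldl stepB (0, 0, [])
  if r.2.1 ≠ 0 then r.2.2 ++ [r.2.1] else r.2.2

-- ===== PRECONDITION & SPEC =====
-- Pre_ excludes inputs where speeds is shorter than progresses (A raises IndexError) and
-- inputs with a nonpositive speed among the first len(progresses) speeds: on those A loops
-- forever, except when every such task is already complete on its release day, where A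
-- still returns but B's ceiling division divides by zero or miscounts.
def Pre_solution (progresses : List Int) (speeds : List Int) : Prop :=
  progresses.length ≤ speeds.length ∧ ∀ s ∈ speeds.take progresses.length, 1 ≤ s
instance (progresses : List Int) (speeds : List Int) : Decidable (Pre_solution progresses speeds) := by
  unfold Pre_solution; infer_instance

def pvWitness_solution : List Int × List Int := ([93, 30, 55], [1, 30, 5])

def Spec_solution (progresses : List Int) (speeds : List Int) (out : List Int) : Prop := out = solution_alt progresses speeds
instance (progresses : List Int) (speeds : List Int) (out : List Int) : Decidable (Spec_solution progresses speeds out) := by unfold Spec_solution; infer_instance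

-- ===== CLAIM (what is proved, stated in full; the proofs are below) =====
def Claim_equal_solution : Prop := ∀ (progresses : List Int) (speeds : List Int), Dom_solution progresses speeds → Pre_solution progresses speeds → Spec_solution progresses speeds (solution progresses speeds)

-- ===== LEMMAS AND PROOFS =====

-- grouping by running maximum, in recursive form (proof-side model of B's fold)
def gB : Int → Int → List Int → List Int
  | _, cnt, [] => if cnt ≠ 0 then [cnt] else []
  | cur, cnt, d :: rest =>
    if cur < d then (if cnt ≠ 0 then cnt :: gB d 1 rest else gB d 1 rest)
    else gB cur (cnt + 1) rest

-- day-level simulation on the list of completion days (proof-side model of A's loop)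
def simD : Nat → Int → List Int → List Int → List Int
  | 0, _, _, acc => acc
  | fuel+1, k, ds, acc =>
    if ds = [] then acc
    else
      let q := (ds.takeWhile (fun d => decide (d ≤ k+1))).length
      simD fuel (k+1) (ds.dropWhile (fun d => decide (d ≤ k+1)))
        (if q ≠ 0 then acc ++ [(q : Int)] else acc)

theorem one_le_daysB (p s : Int) : 1 ≤ daysB p s := by
  unfold daysB; split <;> omega

theorem daysB_le_iff (p s j : Int) (hs : 1 ≤ s) (hj : 1 ≤ j) :
    (daysB p s ≤ j ↔ 100 ≤ p + j * s) := by
  have h : -(PySem.Int.floordiv (p - 100) s) ≤ j ↔ 100 ≤ p + j * s := by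
    rw [neg_le, PySem.Int.le_floordiv_iff_mul_le (by omega : (0:Int) < s)]
    constructor <;> intro h <;> nlinarith
  unfold daysB
  split
  · constructor
    · intro _; rw [← h]; omega
    · intro _; omega
  · exact h

theorem foldB_eq_gB (ds : List (Int × Int)) :
    ∀ (cur cnt : Int) (ans : List Int),
      (let r := ds.foldl stepB (cur, cnt, ans);
       if r.2.1 ≠ 0 then r.2.2 ++ [r.2.1] else r.2.2)
      = ans ++ gB cur cnt (ds.map (fun pr => daysB pr.1 pr.2)) := by
  induction ds with
  | nil =>
    intro cur cnt ans
    simp only [List.foldl_nil, List.map_nil, gB]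
    split <;> simp
  | cons hd tl ih =>
    intro cur cnt ans
    simp only [List.foldl_cons, List.map_cons, gB, stepB]
    by_cases hc : cur < daysB hd.1 hd.2
    · rw [if_pos hc, if_pos hc]
      by_cases hz : cnt ≠ 0
      · rw [if_pos hz, if_pos hz, ih, List.append_assoc, List.singleton_append]
      · rw [if_neg hz, if_neg hz, ih]
    · rw [if_neg hc, if_neg hc, ih]

theorem gB_absorb (cur : Int) : ∀ (ds : List Int) (cnt : Int),
    gB cur cnt ds
      = gB cur (cnt + (ds.takeWhile (fun d => decide (d ≤ cur))).length)
          (ds.dropWhile (fun d => decide (d ≤ cur))) := by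
  intro ds
  induction ds with
  | nil => intro cnt; simp
  | cons d rest ih =>
    intro cnt
    by_cases hd : d ≤ cur
    · have : ¬ cur < d := by omega
      simp only [gB, this, if_neg, List.takeWhile_cons, List.dropWhile_cons, hd,
        decide_true, List.length_cons, if_true]
      rw [ih]
      congr 1
      push_cast; ring
    · have : cur < d := by omega
      simp [List.takeWhile_cons, List.dropWhile_cons, hd]

theorem gB_emit (cur cnt : Int) (ds : List Int) (hcnt : cnt ≠ 0)
    (hhd : ∀ d, ds.head? = some d → cur < d) :
    gB cur cnt ds = cnt :: gB cur 0 ds := by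
  cases ds with
  | nil => simp [gB, hcnt]
  | cons d rest =>
    have h := hhd d rfl
    simp [gB, h, hcnt]

theorem gB_shift (k k' : Int) (ds : List Int)
    (hhd : ∀ d, ds.head? = some d → k < d ∧ k' < d) :
    gB k 0 ds = gB k' 0 ds := by
  cases ds with
  | nil => rfl
  | cons d rest =>
    have h := hhd d rfl
    simp [gB, h.1, h.2]

theorem head?_dropWhile_not {p : Int → Bool} : ∀ (ds : List Int) (d : Int),
    (ds.dropWhile p).head? = some d → p d = false := by
  intro ds
  induction ds with
  | nil => intro d h; simp at h
  | cons x rest ih =>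
    intro d h
    rw [List.dropWhile_cons] at h
    by_cases hx : p x
    · simp only [hx, if_true] at h; exact ih d h
    · simp only [hx] at h
      simp at h
      subst h; simpa using hx

theorem mem_dropWhile {p : Int → Bool} {ds : List Int} {d : Int}
    (h : d ∈ ds.dropWhile p) : d ∈ ds :=
  (List.dropWhile_sublist p (l := ds)).mem h

theorem simD_eq_gB : ∀ (fuel : Nat) (k : Int) (ds : List Int) (acc : List Int),
    (∀ d, ds.head? = some d → k < d) →
    (∀ d ∈ ds, d ≤ k + fuel) →
    simD fuel k ds acc = acc ++ gB k 0 ds := by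
  intro fuel
  induction fuel with
  | zero =>
    intro k ds acc hhd hb
    cases ds with
    | nil => simp [simD, gB]
    | cons d rest =>
      have h1 := hhd d rfl
      have h2 := hb d (by simp)
      omega
  | succ fuel ih =>
    intro k ds acc hhd hb
    cases ds with
    | nil => simp [simD, gB]
    | cons d rest =>
      have hd := hhd d rfl
      simp only [simD]
      rw [if_neg (by simp)]
      by_cases hle : d ≤ k + 1
      · have hdk : d = k + 1 := by omega
        simp only [List.takeWhile_cons, List.dropWhile_cons, hle, decide_true, if_true,
          List.length_cons]
        set t := (rest.takeWhile (fun d => decide (d ≤ k+1))).length with ht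
        set ds' := rest.dropWhile (fun d => decide (d ≤ k+1)) with hds'
        have hq : (t + 1) ≠ 0 := by omega
        rw [if_pos hq]
        have hhd' : ∀ e, ds'.head? = some e → k + 1 < e := by
          intro e he
          have := head?_dropWhile_not rest e he
          simp at this; omega
        rw [ih (k+1) ds' _ hhd' (by
          intro e he
          have := hb e (by exact List.mem_cons_of_mem _ (mem_dropWhile he))
          push_cast; push_cast at this; omega)]
        have hgB : gB k 0 (d :: rest) = ((t + 1 : Nat) : Int) :: gB (k+1) 0 ds' := by
          have h1 : gB k 0 (d :: rest) = gB d 1 rest := by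
            simp only [gB, if_pos hd]
            norm_num
          rw [h1, hdk, gB_absorb (k+1) rest 1]
          have : (1 + t : Int) = ((t + 1 : Nat) : Int) := by push_cast; ring
          rw [← ht, ← hds', this]
          exact gB_emit _ _ _ (by positivity) (fun e he => hhd' e he)
        rw [hgB, List.append_assoc]; rfl
      · have hdec : decide (d ≤ k + 1) = false := by simp [hle]
        simp only [List.takeWhile_cons, List.dropWhile_cons, hdec, Bool.false_eq_true,
          if_false, List.length_nil, ne_eq, not_true_eq_false]
        rw [ih (k+1) (d :: rest) acc (by intro e he; simp at he; omega)
          (by intro e he; have := hb e he; push_cast; push_cast at this; omega)]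
        congr 1
        exact gB_shift (k+1) k (d :: rest) (by intro e he; simp at he; omega)

theorem popA_eq : ∀ (ps ss : List Int),
    popA ps ss = ((ps.takeWhile (fun p => decide (100 ≤ p))).length,
                  ps.dropWhile (fun p => decide (100 ≤ p)),
                  ss.drop (ps.takeWhile (fun p => decide (100 ≤ p))).length) := by
  intro ps
  induction ps with
  | nil => intro ss; simp [popA]
  | cons p pr ih =>
    intro ss
    by_cases hp : 100 ≤ p
    · simp only [popA, if_pos hp, ih, List.takeWhile_cons, List.dropWhile_cons,
        decide_true, if_true, List.length_cons, hp]
      refine Prod.ext rfl (Prod.ext rfl ?_)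
      show ss.tail.drop _ = ss.drop _
      rw [← List.drop_one, List.drop_drop]
      congr 1
      omega
    · simp [popA, hp]

theorem advance_step : ∀ (ps ss : List Int) (k : Int),
    List.zipWith (· + ·) (List.zipWith (fun p s => p + k * s) ps ss) ss
      = List.zipWith (fun p s => p + (k + 1) * s) ps ss := by
  intro ps
  induction ps with
  | nil => intro ss k; simp
  | cons p pr ih =>
    intro ss k
    cases ss with
    | nil => simp
    | cons s sr => simp only [List.zipWith_cons_cons, ih]; congr 1; ring

theorem corr (k : Int) (hk : 0 ≤ k) : ∀ (ps ss : List Int),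
    ps.length ≤ ss.length → (∀ pr ∈ ps.zip ss, 1 ≤ pr.2) →
    (((List.zipWith (fun p s => p + (k+1) * s) ps ss).takeWhile (fun x => decide (100 ≤ x))).length
        = ((List.zipWith daysB ps ss).takeWhile (fun d => decide (d ≤ k+1))).length)
    ∧ ((List.zipWith (fun p s => p + (k+1) * s) ps ss).dropWhile (fun x => decide (100 ≤ x))
        = List.zipWith (fun p s => p + (k+1) * s)
            (ps.drop ((List.zipWith daysB ps ss).takeWhile (fun d => decide (d ≤ k+1))).length)
            (ss.drop ((List.zipWith daysB ps ss).takeWhile (fun d => decide (d ≤ k+1))).length))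
    ∧ ((List.zipWith daysB ps ss).dropWhile (fun d => decide (d ≤ k+1))
        = List.zipWith daysB
            (ps.drop ((List.zipWith daysB ps ss).takeWhile (fun d => decide (d ≤ k+1))).length)
            (ss.drop ((List.zipWith daysB ps ss).takeWhile (fun d => decide (d ≤ k+1))).length)) := by
  intro ps
  induction ps with
  | nil => intro ss _ _; simp
  | cons p pr ih =>
    intro ss hlen hpos
    cases ss with
    | nil => simp at hlen
    | cons s sr =>
      have hs : 1 ≤ s := hpos (p, s) (by simp)
      have hiff := daysB_le_iff p s (k+1) hs (by omega)
      by_cases hc : daysB p s ≤ k + 1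
      · have hx : 100 ≤ p + (k+1) * s := hiff.mp hc
        obtain ⟨i1, i2, i3⟩ := ih sr (by simpa using hlen)
          (fun x hx => hpos x (by rw [List.zip_cons_cons]; exact List.mem_cons_of_mem _ hx))
        simp only [List.zipWith_cons_cons, List.takeWhile_cons, List.dropWhile_cons,
          hx, hc, decide_true, if_true, List.length_cons, List.drop_succ_cons]
        refine ⟨by omega, ?_, ?_⟩ <;> simp [i2, i3]
      · have hx : ¬ 100 ≤ p + (k+1) * s := fun h => hc (hiff.mpr h)
        simp [List.zipWith_cons_cons, List.takeWhile_cons, List.dropWhile_cons, hx, hc]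

theorem zip_drop_eq (ps ss : List Int) (q : Nat) :
    (ps.drop q).zip (ss.drop q) = (ps.zip ss).drop q := by
  simp [List.zip, List.drop_zipWith]

theorem loopA_eq_simD : ∀ (fuel : Nat) (k : Int) (ps ss : List Int) (acc : List Int),
    0 ≤ k → ps.length ≤ ss.length → (∀ pr ∈ ps.zip ss, 1 ≤ pr.2) →
    loopA fuel (List.zipWith (fun p s => p + k * s) ps ss) ss acc
      = simD fuel k (List.zipWith daysB ps ss) acc := by
  intro fuel
  induction fuel with
  | zero => intro k ps ss acc _ _ _; rfl
  | succ fuel ih =>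
    intro k ps ss acc hk hlen hpos
    cases ps with
    | nil => simp [loopA, simD]
    | cons p pr =>
      cases ss with
      | nil => simp at hlen
      | cons s sr =>
        simp only [loopA, simD]
        rw [if_neg (show (List.zipWith (fun p s => p + k * s) (p :: pr) (s :: sr)) ≠ [] from by simp)]
        rw [if_neg (show (List.zipWith daysB (p :: pr) (s :: sr)) ≠ [] from by simp)]
        rw [advance_step]
        rw [popA_eq]
        obtain ⟨c1, c2, c3⟩ := corr k hk (p :: pr) (s :: sr) hlen hpos
        set q := ((List.zipWith daysB (p :: pr) (s :: sr)).takeWhile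
          (fun d => decide (d ≤ k+1))).length with hq
        rw [c1, c2]
        rw [ih (k+1) ((p :: pr).drop q) ((s :: sr).drop q) _
          (by omega)
          (by simp only [List.length_drop]; omega)
          (by
            intro pr' hpr'
            apply hpos
            rw [zip_drop_eq] at hpr'
            exact List.mem_of_mem_drop hpr')]
        rw [c3]

theorem advance_zero : ∀ (ps ss : List Int), ps.length ≤ ss.length →
    List.zipWith (fun p s => p + 0 * s) ps ss = ps := by
  intro ps
  induction ps with
  | nil => intro ss _; rfl
  | cons p pr ih =>
    intro ss hlen
    cases ss with
    | nil => simp at hlen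
    | cons s sr =>
      simp only [List.zipWith_cons_cons]
      rw [ih sr (by simpa using hlen)]
      norm_num

theorem daysB_le_fuel (p s : Int) (hs : 1 ≤ s) : daysB p s ≤ (101 + p.natAbs : Int) := by
  have h0 : (0:Int) ≤ (p.natAbs : Int) := Int.natCast_nonneg _
  have hj : (1:Int) ≤ 101 + p.natAbs := by omega
  rw [daysB_le_iff p s _ hs hj]
  have habs : ((p.natAbs : Int)) = |p| := (Int.abs_eq_natAbs p).symm
  rw [habs]
  nlinarith [neg_abs_le p, mul_le_mul_of_nonneg_left hs (show (0:Int) ≤ 101 + |p| by positivity)]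

theorem term_le_fuelA {p : Int} {ps : List Int} (h : p ∈ ps) :
    (101 + p.natAbs : Int) ≤ (fuelA ps : Int) := by
  unfold fuelA
  have h1 : p.natAbs + 101 ≤ (ps.map (fun p => p.natAbs + 101)).sum :=
    List.single_le_sum (by simp) _ (List.mem_map_of_mem h)
  have h2 : 101 + p.natAbs ≤ 101 + (ps.map (fun p => p.natAbs + 101)).sum := by omega
  exact_mod_cast h2

theorem zipWith_eq_map_zip (f : Int → Int → Int) :
    ∀ (ps ss : List Int), List.zipWith f ps ss = (ps.zip ss).map (fun pr => f pr.1 pr.2) := by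
  intro ps
  induction ps with
  | nil => intro ss; simp
  | cons p pr ih =>
    intro ss
    cases ss with
    | nil => simp
    | cons s sr => simp [ih]

-- ===== VERDICT (by name: the statement is the Claim_ definition above) =====
theorem solution_spec : Claim_equal_solution := by
  intro ps ss _ hpre
  obtain ⟨hlen, hpos⟩ := hpre
  unfold Spec_solution solution solution_alt
  have hpos' : ∀ pr ∈ ps.zip ss, 1 ≤ pr.2 := by
    intro pr hpr
    apply hpos
    obtain ⟨i, hi, hget⟩ := List.mem_iff_getElem.mp hpr
    have hil : i < ps.length := by simp [List.length_zip] at hi; omega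
    have his : i < ss.length := by omega
    have h2 : pr.2 = ss[i] := by rw [← hget]; simp
    rw [h2]
    exact List.mem_iff_getElem.mpr ⟨i, by simp [List.length_take]; omega, by simp⟩
  have h0 : loopA (fuelA ps) ps ss [] = loopA (fuelA ps) (List.zipWith (fun p s => p + 0 * s) ps ss) ss [] := by
    rw [advance_zero ps ss hlen]
  rw [h0, loopA_eq_simD (fuelA ps) 0 ps ss [] le_rfl hlen hpos']
  rw [simD_eq_gB (fuelA ps) 0 (List.zipWith daysB ps ss) []
    (by
      intro d hd
      cases ps with
      | nil => simp at hd
      | cons p pr =>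
        cases ss with
        | nil => simp at hlen
        | cons s sr =>
          simp only [List.zipWith_cons_cons, List.head?_cons, Option.some.injEq] at hd
          subst hd
          have := one_le_daysB p s
          omega)
    (by
      intro d hd
      rw [zipWith_eq_map_zip] at hd
      obtain ⟨pr, hmem, hval⟩ := List.mem_map.mp hd
      have h1 := daysB_le_fuel pr.1 pr.2 (hpos' pr hmem)
      have h2 := term_le_fuelA (List.of_mem_zip hmem).1
      omega)]
  rw [foldB_eq_gB]
  simp only [List.nil_append]
  congr 1
  rw [zipWith_eq_map_zip]
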